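-- pv_equiv track=rewrite | github.com/Jerry2003826/RelationshipOS | benchmarks/report.py | _delta_dimension_columns
-- ===== SOURCE A (Python) =====
-- from typing import Any
--
-- _DIMENSION_LABELS = {
--     "memory_recall": "Memory Recall",
--     "cross_session_consistency": "Cross-Session Consistency",
--     "emotional_quality": "Emotional Quality",
--     "proactive_safety": "Proactive Safety",
--     "governance_alignment": "Governance Alignment",
--     "social_omniscience": "Social Omniscience",
--     "conscience_decisions": "Conscience Decisions",
--     "persona_continuity": "Persona Continuity",
--     "cross_user_attribution": "Cross-User Attribution",
--     "latency_budget": "Latency Budget",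
--     "long_chat_continuity_zh": "Long Chat Continuity (ZH)",
--     "persona_stability_zh": "Persona Stability (ZH)",
--     "naturalness_under_memory": "Naturalness Under Memory",
--     "social_world_control": "Social World Control",
--     "cross_session_friend_feel": "Cross-Session Friend Feel",
-- }
--
-- def _delta_dimension_columns(comparisons: dict[str, Any]) -> list[str]:
--     seen: list[str] = []
--     for item in comparisons.values():
--         if not item:
--             continue
--         for name in item.get("dimension_deltas", {}):
--             if name not in seen:
--                 seen.append(name)
--     ordered = [name for name in _DIMENSION_LABELS if name in seen]
--     ordered.extend(name for name in seen if name not in ordered)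
--     return ordered
-- ===== SOURCE B (Python) =====
-- _DIMENSION_LABELS = {
--     "memory_recall": "Memory Recall",
--     "cross_session_consistency": "Cross-Session Consistency",
--     "emotional_quality": "Emotional Quality",
--     "proactive_safety": "Proactive Safety",
--     "governance_alignment": "Governance Alignment",
--     "social_omniscience": "Social Omniscience",
--     "conscience_decisions": "Conscience Decisions",
--     "persona_continuity": "Persona Continuity",
--     "cross_user_attribution": "Cross-User Attribution",
--     "latency_budget": "Latency Budget",
--     "long_chat_continuity_zh": "Long Chat Continuity (ZH)",
--     "persona_stability_zh": "Persona Stability (ZH)",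
--     "naturalness_under_memory": "Naturalness Under Memory",
--     "social_world_control": "Social World Control",
--     "cross_session_friend_feel": "Cross-Session Friend Feel",
-- }
--
-- def _delta_dimension_columns(comparisons):
--     rank = {name: i for i, name in enumerate(_DIMENSION_LABELS)}
--     seen_index = {}
--     for item in comparisons.values():
--         if not item:
--             continue
--         for name in item.get("dimension_deltas", {}):
--             if name not in seen_index:
--                 seen_index[name] = len(seen_index)
--     k = len(rank)
--     return sorted(seen_index, key=lambda n: rank[n] if n in rank else k + seen_index[n])
-- ===== Notes on version B (the rewrite author's own statement) =====
-- stated objective: alternative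
-- what changed: Replaces A's two label-filtering passes (filter the label table by membership in seen, then extend with the leftover names, each with an inner list scan) by building a rank index table and a first-seen-index dict in one pass and returning a single key-based sort of the collected names.
import Mathlib
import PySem

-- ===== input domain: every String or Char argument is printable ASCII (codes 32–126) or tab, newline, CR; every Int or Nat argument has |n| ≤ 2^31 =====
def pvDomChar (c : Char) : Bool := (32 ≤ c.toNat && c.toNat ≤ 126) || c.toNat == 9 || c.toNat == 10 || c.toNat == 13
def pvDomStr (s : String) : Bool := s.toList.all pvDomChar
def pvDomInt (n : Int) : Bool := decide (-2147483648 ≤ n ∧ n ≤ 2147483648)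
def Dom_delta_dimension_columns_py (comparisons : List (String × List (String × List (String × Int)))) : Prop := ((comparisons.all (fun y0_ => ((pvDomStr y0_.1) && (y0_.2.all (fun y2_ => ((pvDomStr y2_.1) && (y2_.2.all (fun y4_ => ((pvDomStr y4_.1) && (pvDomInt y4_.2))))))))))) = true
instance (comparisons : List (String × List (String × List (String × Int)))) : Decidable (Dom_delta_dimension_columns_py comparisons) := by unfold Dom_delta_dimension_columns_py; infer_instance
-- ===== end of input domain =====

-- B replaces A's two label-filtering passes by a rank table plus one key-based sort of the
-- first-seen dimension names (objective: alternative, not measured faster).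

-- module constant _DIMENSION_LABELS (shared context of A and B)
def pvDimensionLabels : PySem.Dict String String := PySem.Dict.ofList [
  ("memory_recall", "Memory Recall"),
  ("cross_session_consistency", "Cross-Session Consistency"),
  ("emotional_quality", "Emotional Quality"),
  ("proactive_safety", "Proactive Safety"),
  ("governance_alignment", "Governance Alignment"),
  ("social_omniscience", "Social Omniscience"),
  ("conscience_decisions", "Conscience Decisions"),
  ("persona_continuity", "Persona Continuity"),
  ("cross_user_attribution", "Cross-User Attribution"),
  ("latency_budget", "Latency Budget"),
  ("long_chat_continuity_zh", "Long Chat Continuity (ZH)"),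
  ("persona_stability_zh", "Persona Stability (ZH)"),
  ("naturalness_under_memory", "Naturalness Under Memory"),
  ("social_world_control", "Social World Control"),
  ("cross_session_friend_feel", "Cross-Session Friend Feel")]

-- ===== PORT A =====
def delta_dimension_columns_py (comparisons : List (String × List (String × List (String × Int)))) : List String :=
  -- seen = []; for item in comparisons.values(): if not item: continue; for name in item.get("dimension_deltas", {}): if name not in seen: seen.append(name)
  let seen : List String :=
    (PySem.Dict.ofList comparisons).values.foldl (fun seen item =>
      if item.isEmpty then seen
      else (PySem.Dict.ofList ((PySem.Dict.ofList item).getD "dimension_deltas" [])).keys.foldl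
        (fun seen name => if seen.contains name then seen else seen ++ [name]) seen) []
  -- ordered = [name for name in _DIMENSION_LABELS if name in seen]
  let ordered : List String := pvDimensionLabels.keys.filter (fun name => seen.contains name)
  -- ordered.extend(name for name in seen if name not in ordered)  (membership checked against the growing list)
  seen.foldl (fun ordered name => if ordered.contains name then ordered else ordered ++ [name]) ordered

-- ===== PORT B =====
def delta_dimension_columns_py_alt (comparisons : List (String × List (String × List (String × Int)))) : List String :=
  -- rank = {name: i for i, name in enumerate(_DIMENSION_LABELS)}
  let rank : PySem.Dict String Int :=
    (PySem.List.enumerate pvDimensionLabels.keys).foldl (fun d p => d.insert p.2 p.1) PySem.Dict.empty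
  -- seen_index = {}; for item in …: if not item: continue; for name in …: if name not in seen_index: seen_index[name] = len(seen_index)
  let seenIdx : PySem.Dict String Int :=
    (PySem.Dict.ofList comparisons).values.foldl (fun d item =>
      if item.isEmpty then d
      else (PySem.Dict.ofList ((PySem.Dict.ofList item).getD "dimension_deltas" [])).keys.foldl
        (fun d name => if d.contains name then d else d.insert name (d.size : Int)) d) PySem.Dict.empty
  let k : Int := rank.size
  -- sorted(seen_index, key=lambda n: rank[n] if n in rank else k + seen_index[n])
  PySem.List.sorted seenIdx.keys
    (fun n => if rank.contains n then rank.getD n 0 else k + seenIdx.getD n 0) false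

-- ===== PRECONDITION & SPEC =====
def Spec_delta_dimension_columns_py (comparisons : List (String × List (String × List (String × Int)))) (out : List String) : Prop := out = delta_dimension_columns_py_alt comparisons
instance (comparisons : List (String × List (String × List (String × Int)))) (out : List String) : Decidable (Spec_delta_dimension_columns_py comparisons out) := by unfold Spec_delta_dimension_columns_py; infer_instance

-- ===== CLAIM (what is proved, stated in full; the proofs are below) =====
def Claim_equal_delta_dimension_columns_py : Prop := ∀ (comparisons : List (String × List (String × List (String × Int)))), Dom_delta_dimension_columns_py comparisons → Spec_delta_dimension_columns_py comparisons (delta_dimension_columns_py comparisons)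

-- ===== LEMMAS AND PROOFS =====

-- the stream of dimension names both loops traverse
def pvNames (comparisons : List (String × List (String × List (String × Int)))) : List String :=
  (PySem.Dict.ofList comparisons).values.flatMap
    (fun item => (PySem.Dict.ofList ((PySem.Dict.ofList item).getD "dimension_deltas" [])).keys)

-- rank, the let-bound table of B's port, as a closed constant
def pvRank : PySem.Dict String Int :=
  (PySem.List.enumerate pvDimensionLabels.keys).foldl (fun d p => d.insert p.2 p.1) PySem.Dict.empty

lemma pv_foldl_flatMap {α β γ : Type} (l : List α) (g : α → List β) (f : γ → β → γ) (i : γ) :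
    (l.flatMap g).foldl f i = l.foldl (fun a x => (g x).foldl f a) i := by
  induction l generalizing i with
  | nil => rfl
  | cons h t ih => simp [List.flatMap_cons, List.foldl_append, ih]

lemma pv_seenA_eq (comparisons : List (String × List (String × List (String × Int)))) :
    (PySem.Dict.ofList comparisons).values.foldl (fun seen item =>
      if item.isEmpty then seen
      else (PySem.Dict.ofList ((PySem.Dict.ofList item).getD "dimension_deltas" [])).keys.foldl
        (fun seen name => if seen.contains name then seen else seen ++ [name]) seen) []
    = (pvNames comparisons).foldl (fun seen name => if seen.contains name then seen else seen ++ [name]) [] := by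
  rw [pvNames, pv_foldl_flatMap]
  apply PySem.List.foldl_congr_mem
  intro acc item _
  by_cases h : item.isEmpty
  · simp only [h, if_true]
    rw [List.isEmpty_iff.mp h]
    rfl
  · simp [h]

lemma pv_seenB_eq (comparisons : List (String × List (String × List (String × Int)))) :
    (PySem.Dict.ofList comparisons).values.foldl (fun d item =>
      if item.isEmpty then d
      else (PySem.Dict.ofList ((PySem.Dict.ofList item).getD "dimension_deltas" [])).keys.foldl
        (fun d name => if d.contains name then d else d.insert name (d.size : Int)) d) PySem.Dict.empty
    = (pvNames comparisons).foldl (fun d name => if d.contains name then d else d.insert name (d.size : Int)) PySem.Dict.empty := by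
  rw [pvNames, pv_foldl_flatMap]
  apply PySem.List.foldl_congr_mem
  intro acc item _
  by_cases h : item.isEmpty
  · simp only [h, if_true]
    rw [List.isEmpty_iff.mp h]
    rfl
  · simp [h]

-- invariant of the two seen-collecting loops: same keys in the same order, fresh keys get
-- strictly increasing nonnegative indices below the dict's size
lemma pv_fold_inv (names : List String) (d : PySem.Dict String Int)
    (hnd : d.keys.Nodup)
    (hv : ∀ n ∈ d.keys, 0 ≤ d.getD n 0 ∧ d.getD n 0 < (d.size : Int))
    (hp : d.keys.Pairwise (fun a b => d.getD a 0 < d.getD b 0)) :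
    (names.foldl (fun d name => if d.contains name then d else d.insert name (d.size : Int)) d).keys
      = names.foldl (fun s name => if s.contains name then s else s ++ [name]) d.keys
    ∧ (names.foldl (fun d name => if d.contains name then d else d.insert name (d.size : Int)) d).keys.Nodup
    ∧ (∀ n ∈ (names.foldl (fun d name => if d.contains name then d else d.insert name (d.size : Int)) d).keys,
         0 ≤ (names.foldl (fun d name => if d.contains name then d else d.insert name (d.size : Int)) d).getD n 0
         ∧ (names.foldl (fun d name => if d.contains name then d else d.insert name (d.size : Int)) d).getD n 0
             < ((names.foldl (fun d name => if d.contains name then d else d.insert name (d.size : Int)) d).size : Int))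
    ∧ (names.foldl (fun d name => if d.contains name then d else d.insert name (d.size : Int)) d).keys.Pairwise
        (fun a b => (names.foldl (fun d name => if d.contains name then d else d.insert name (d.size : Int)) d).getD a 0
                  < (names.foldl (fun d name => if d.contains name then d else d.insert name (d.size : Int)) d).getD b 0) := by
  induction names generalizing d with
  | nil => exact ⟨rfl, hnd, hv, hp⟩
  | cons name rest ih =>
    simp only [List.foldl_cons]
    by_cases hm : name ∈ d.keys
    · have hc : d.contains name = true := (PySem.Dict.contains_iff_mem_keys d name).mpr hm
      have hlc : d.keys.contains name = true := by simpa using hm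
      simp only [hc, hlc, if_true]
      exact ih d hnd hv hp
    · have hc : d.contains name = false := by
        by_contra h
        exact hm ((PySem.Dict.contains_iff_mem_keys d name).mp (by simpa using h))
      have hlc : d.keys.contains name = false := by simpa using hm
      simp only [hc, hlc, if_false, Bool.false_eq_true]
      have hkeys : (d.insert name (d.size : Int)).keys = d.keys ++ [name] :=
        PySem.Dict.keys_insert_of_not_contains d _ hc
      have hsize : (d.insert name (d.size : Int)).size = d.size + 1 := by
        rw [PySem.Dict.size_insert, hc]; simp
      have hgetold : ∀ n ∈ d.keys, (d.insert name (d.size : Int)).getD n 0 = d.getD n 0 := by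
        intro n hn
        exact PySem.Dict.getD_insert_of_ne d _ _ (fun h => hm (h ▸ hn))
      have hgetnew : (d.insert name (d.size : Int)).getD name 0 = (d.size : Int) :=
        PySem.Dict.getD_insert_self d _ _ _
      have H := ih (d.insert name (d.size : Int)) ?_ ?_ ?_
      · rw [hkeys] at H; exact H
      · rw [hkeys]
        simp only [List.nodup_append, List.nodup_cons, List.not_mem_nil, not_false_iff, List.nodup_nil, and_true]
        refine ⟨hnd, trivial, ?_⟩
        intro a ha b hb h
        rw [List.mem_singleton] at hb
        exact hm ((hb ▸ h) ▸ ha)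
      · intro n hn
        rw [hkeys] at hn
        rcases List.mem_append.mp hn with hn | hn
        · rw [hgetold n hn, hsize]
          have := hv n hn
          constructor
          · exact this.1
          · push_cast; omega
        · rw [List.mem_singleton.mp hn, hgetnew, hsize]
          constructor
          · positivity
          · push_cast; omega
      · rw [hkeys]
        rw [List.pairwise_append]
        refine ⟨?_, ?_, ?_⟩
        · apply hp.imp_of_mem
          intro a b ha hb hab
          rw [hgetold a ha, hgetold b hb]; exact hab
        · simp
        · intro a ha b hb
          rw [List.mem_singleton.mp hb, hgetold a ha, hgetnew]
          exact (hv a ha).2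

lemma pv_main (names : List String) :
    (names.foldl (fun s n => if s.contains n then s else s ++ [n]) []).foldl
        (fun ordered name => if ordered.contains name then ordered else ordered ++ [name])
        (pvDimensionLabels.keys.filter (fun name => (names.foldl (fun s n => if s.contains n then s else s ++ [n]) []).contains name))
    = PySem.List.sorted
        (names.foldl (fun d n => if d.contains n then d else d.insert n (d.size : Int)) PySem.Dict.empty).keys
        (fun n => if pvRank.contains n then pvRank.getD n 0
                  else (pvRank.size : Int) + (names.foldl (fun d n => if d.contains n then d else d.insert n (d.size : Int)) PySem.Dict.empty).getD n 0) false := by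
  obtain ⟨hk, hnd, hv, hp⟩ := pv_fold_inv names PySem.Dict.empty (by simp) (by simp) (by simp)
  set d := names.foldl (fun d n => if d.contains n then d else d.insert n (d.size : Int)) PySem.Dict.empty with hd
  set seen := names.foldl (fun s n => if s.contains n then s else s ++ [n]) [] with hseen
  have hkeys : d.keys = seen := by
    rw [hk]; rfl
  have hseenNodup : seen.Nodup := hkeys ▸ hnd
  set ordered := pvDimensionLabels.keys.filter (fun name => seen.contains name) with hord
  -- A's extend loop is set-update
  have hA : seen.foldl (fun ordered name => if ordered.contains name then ordered else ordered ++ [name]) ordered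
      = ordered ++ seen.filter (fun y => !(ordered.contains y)) := by
    have h1 : seen.foldl (fun ordered name => if ordered.contains name then ordered else ordered ++ [name]) ordered
        = PySem.Set.update ordered seen := rfl
    rw [h1, PySem.Set.update_eq_append_filter, PySem.Set.ofList_eq_self_of_nodup seen hseenNodup]
    simp [PySem.Set.contains_eq_listContains]
  rw [hA]
  set extras := seen.filter (fun y => !(ordered.contains y)) with hex
  -- concrete facts about the label table
  have hKnodup : pvDimensionLabels.keys.Nodup := by decide
  have hRankKeys : pvRank.keys = pvDimensionLabels.keys := by decide
  have hRankSize : (pvRank.size : Int) = 15 := by decide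
  have hRankLt : ∀ n ∈ pvDimensionLabels.keys, pvRank.getD n 0 < 15 := by decide
  have hRankPair : pvDimensionLabels.keys.Pairwise (fun a b => pvRank.getD a 0 < pvRank.getD b 0) := by decide
  have hRankMem : ∀ n, pvRank.contains n = true ↔ n ∈ pvDimensionLabels.keys := by
    intro n; rw [PySem.Dict.contains_iff_mem_keys, hRankKeys]
  -- membership characterisations
  have hOrdMem : ∀ a, a ∈ ordered ↔ a ∈ pvDimensionLabels.keys ∧ a ∈ seen := by
    intro a; rw [hord, List.mem_filter]; simp
  have hExMem : ∀ b, b ∈ extras ↔ b ∈ seen ∧ b ∉ ordered := by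
    intro b; rw [hex, List.mem_filter]; simp
  symm
  apply PySem.List.sorted_eq_of_perm_of_pairwise_lt
  · -- permutation
    rw [hkeys]
    apply (List.perm_ext_iff_of_nodup ?_ hseenNodup).mpr
    · intro x
      constructor
      · intro hx
        rcases List.mem_append.mp hx with hx | hx
        · exact ((hOrdMem x).mp hx).2
        · exact ((hExMem x).mp hx).1
      · intro hx
        by_cases ho : x ∈ ordered
        · exact List.mem_append.mpr (Or.inl ho)
        · exact List.mem_append.mpr (Or.inr ((hExMem x).mpr ⟨hx, ho⟩))
    · rw [List.nodup_append]
      refine ⟨hKnodup.filter _, hseenNodup.filter _, ?_⟩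
      intro a ha b hb h
      exact ((hExMem b).mp hb).2 (h ▸ ha)
  · -- pairwise strictly increasing key
    rw [List.pairwise_append]
    refine ⟨?_, ?_, ?_⟩
    · -- within ordered
      have h1 : ordered.Pairwise (fun a b => pvRank.getD a 0 < pvRank.getD b 0) :=
        List.Pairwise.sublist (List.filter_sublist) hRankPair
      apply h1.imp_of_mem
      intro a b ha hb hab
      have hca : pvRank.contains a = true := (hRankMem a).mpr ((hOrdMem a).mp ha).1
      have hcb : pvRank.contains b = true := (hRankMem b).mpr ((hOrdMem b).mp hb).1
      simp only [hca, hcb, if_true]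
      exact hab
    · -- within extras
      have h1 : extras.Pairwise (fun a b => d.getD a 0 < d.getD b 0) := by
        apply List.Pairwise.sublist _ hp
        rw [hkeys]
        exact List.filter_sublist
      apply h1.imp_of_mem
      intro a b ha hb hab
      have hna : pvRank.contains a = false := by
        rcases (hExMem a).mp ha with ⟨hs, ho⟩
        by_contra h
        have := (hRankMem a).mp (by simpa using h)
        exact ho ((hOrdMem a).mpr ⟨this, hs⟩)
      have hnb : pvRank.contains b = false := by
        rcases (hExMem b).mp hb with ⟨hs, ho⟩
        by_contra h
        have := (hRankMem b).mp (by simpa using h)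
        exact ho ((hOrdMem b).mpr ⟨this, hs⟩)
      simp only [hna, hnb, Bool.false_eq_true, if_false]
      omega
    · -- cross
      intro a ha b hb
      have hca : pvRank.contains a = true := (hRankMem a).mpr ((hOrdMem a).mp ha).1
      have hnb : pvRank.contains b = false := by
        rcases (hExMem b).mp hb with ⟨hs, ho⟩
        by_contra h
        have := (hRankMem b).mp (by simpa using h)
        exact ho ((hOrdMem b).mpr ⟨this, hs⟩)
      simp only [hca, hnb, Bool.false_eq_true, if_true, if_false]
      have h1 : pvRank.getD a 0 < 15 := hRankLt a ((hOrdMem a).mp ha).1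
      have h2 : 0 ≤ d.getD b 0 := (hv b (hkeys ▸ ((hExMem b).mp hb).1)).1
      rw [hRankSize]
      omega

-- ===== VERDICT (by name: the statement is the Claim_ definition above) =====
theorem delta_dimension_columns_py_spec : Claim_equal_delta_dimension_columns_py := by
  intro comparisons _
  simp only [Spec_delta_dimension_columns_py, delta_dimension_columns_py, delta_dimension_columns_py_alt]
  rw [pv_seenA_eq, pv_seenB_eq]
  exact pv_main (pvNames comparisons)
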